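-- pv_equiv track=rewrite | github.com/c19-rnd-dashboard/py-api-vac-rnd-dash | api/models.py | get_phase_num
-- ===== SOURCE A (Python) =====
-- def get_phase_num(phase):
--     nums = [int(i) for i in phase if i.isdigit()]
--     if len(nums) == 0:
--         if "applicable" in phase:
--             return None
--         else:
--             return 0
--     else:
--         return max(nums)
-- ===== SOURCE B (Python) =====
-- def get_phase_num(phase):
--     for v in range(9, -1, -1):
--         if str(v) in phase:
--             return v
--     if "applicable" in phase:
--         return None
--     return 0
-- ===== Notes on version B (the rewrite author's own statement) =====
-- stated objective: faster
-- what changed: Instead of extracting every digit character into a Python-level list and taking its max, B scans the fixed digit alphabet from 9 down to 0 and returns the first digit that occurs in the string via the C-level substring test, keeping the same no-digit fallback.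
import Mathlib
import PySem

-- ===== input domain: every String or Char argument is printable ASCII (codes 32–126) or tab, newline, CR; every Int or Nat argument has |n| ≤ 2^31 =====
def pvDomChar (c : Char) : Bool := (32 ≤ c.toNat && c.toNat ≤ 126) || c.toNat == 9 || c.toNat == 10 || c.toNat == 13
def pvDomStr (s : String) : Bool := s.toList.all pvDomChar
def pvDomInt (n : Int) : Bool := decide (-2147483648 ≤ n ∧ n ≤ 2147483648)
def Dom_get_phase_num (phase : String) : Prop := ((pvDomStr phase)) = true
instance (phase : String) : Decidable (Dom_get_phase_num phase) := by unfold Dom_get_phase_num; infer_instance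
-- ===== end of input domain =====

-- B scans the digit alphabet 9..0 with substring-membership tests instead of
-- collecting all digit characters and taking their max; same fallback, same results.

-- ===== PORT A =====
def get_phase_num (phase : String) : Option Int :=
  -- nums = [int(i) for i in phase if i.isdigit()]  (int(i) never raises on a digit char)
  let nums : List Int := phase.toList.filterMap
    (fun c => if PySem.Chars.isdigit c then PySem.Int.ofChars? [c] else none)
  if nums.length = 0 then
    if PySem.Str.isIn "applicable" phase then none else some 0
  else
    PySem.List.max? nums (fun x => x)

-- ===== PORT B =====
-- for v in range(9, -1, -1): if str(v) in phase: return v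
def pvScan : List Int → List Char → Option Int
  | [], _ => none
  | v :: vs, s =>
      if PySem.Chars.isIn (PySem.Int.toStr v).toList s then some v else pvScan vs s

def get_phase_num_alt (phase : String) : Option Int :=
  match pvScan (PySem.List.pyRange 9 (-1) (-1)) phase.toList with
  | some v => some v
  | none => if PySem.Str.isIn "applicable" phase then none else some 0

-- ===== PRECONDITION & SPEC =====
def Spec_get_phase_num (phase : String) (out : Option Int) : Prop := out = get_phase_num_alt phase
instance (phase : String) (out : Option Int) : Decidable (Spec_get_phase_num phase out) := by unfold Spec_get_phase_num; infer_instance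

-- ===== CLAIM (what is proved, stated in full; the proofs are below) =====
def Claim_equal_get_phase_num : Prop := ∀ (phase : String), Dom_get_phase_num phase → Spec_get_phase_num phase (get_phase_num phase)

-- ===== LEMMAS AND PROOFS =====

-- digit characters have code 48..57
theorem pv_isdigit_bounds (c : Char) (h : PySem.Chars.isdigit c = true) :
    48 ≤ c.toNat ∧ c.toNat ≤ 57 := by
  simp [PySem.Chars.isdigit, Char.le_def, UInt32.le_iff_toNat_le] at h
  exact ⟨h.1, h.2⟩

theorem pv_ofChars_ofNat (k : Nat) (h1 : 48 ≤ k) (h2 : k ≤ 57) :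
    PySem.Int.ofChars? [Char.ofNat k] = some ((k : Int) - 48) := by
  interval_cases k <;> decide

-- int(c) on a digit char c is its digit value
theorem pv_ofChars_digit (c : Char) (h : PySem.Chars.isdigit c = true) :
    PySem.Int.ofChars? [c] = some ((c.toNat : Int) - 48) := by
  obtain ⟨h1, h2⟩ := pv_isdigit_bounds c h
  have := pv_ofChars_ofNat c.toNat h1 h2
  rwa [Char.ofNat_toNat] at this

theorem pv_f_digitChar (k : Nat) (hk : k ≤ 9) :
    (fun c => if PySem.Chars.isdigit c then PySem.Int.ofChars? [c] else none)
      (Char.ofNat (48 + k)) = some (k : Int) := by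
  interval_cases k <;> decide

theorem pv_toStr_digit (k : Nat) (hk : k ≤ 9) :
    (PySem.Int.toStr (k : Int)).toList = [Char.ofNat (48 + k)] := by
  interval_cases k <;> decide

theorem pv_isIn_singleton (d : Char) (l : List Char) :
    PySem.Chars.isIn [d] l = true ↔ d ∈ l := by
  rw [PySem.Chars.isIn_iff_infix]
  constructor
  · intro h
    exact h.sublist.subset (List.mem_singleton_self d)
  · intro h
    obtain ⟨s, t, rfl⟩ := List.append_of_mem h
    exact ⟨s, t, by simp⟩

theorem pv_mem_nums (l : List Char) (k : Nat) (hk : k ≤ 9) :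
    (k : Int) ∈ l.filterMap
        (fun c => if PySem.Chars.isdigit c then PySem.Int.ofChars? [c] else none)
      ↔ Char.ofNat (48 + k) ∈ l := by
  rw [List.mem_filterMap]
  constructor
  · rintro ⟨c, hc, hfc⟩
    by_cases hd : PySem.Chars.isdigit c = true
    · rw [if_pos hd, pv_ofChars_digit c hd] at hfc
      obtain ⟨h1, h2⟩ := pv_isdigit_bounds c hd
      have hval : (c.toNat : Int) - 48 = (k : Int) := by
        exact Option.some.inj hfc
      have : c.toNat = 48 + k := by omega
      have hc' : Char.ofNat (48 + k) = c := by
        rw [← this]; exact Char.ofNat_toNat c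
      rwa [hc']
    · rw [if_neg hd] at hfc; exact absurd hfc (by simp)
  · intro h
    exact ⟨Char.ofNat (48 + k), h, pv_f_digitChar k hk⟩

theorem pv_nums_bounds (l : List Char) (x : Int)
    (hx : x ∈ l.filterMap
        (fun c => if PySem.Chars.isdigit c then PySem.Int.ofChars? [c] else none)) :
    0 ≤ x ∧ x ≤ 9 := by
  rw [List.mem_filterMap] at hx
  obtain ⟨c, _, hfc⟩ := hx
  by_cases hd : PySem.Chars.isdigit c = true
  · rw [if_pos hd, pv_ofChars_digit c hd] at hfc
    obtain ⟨h1, h2⟩ := pv_isdigit_bounds c hd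
    have := Option.some.inj hfc
    omega
  · rw [if_neg hd] at hfc; exact absurd hfc (by simp)

theorem pv_max_eq (xs : List Int) (m : Int) (hm : m ∈ xs) (hub : ∀ y ∈ xs, y ≤ m) :
    PySem.List.max? xs (fun x => x) = some m := by
  cases hmx : PySem.List.max? xs (fun x => x) with
  | none =>
      rw [PySem.List.max?_eq_none_iff] at hmx
      subst hmx; exact absurd hm (List.not_mem_nil)
  | some m' =>
      have h1 : m' ≤ m := hub m' (PySem.List.max?_mem hmx)
      have h2 : m ≤ m' := PySem.List.max?_isMax hmx m hm
      rw [le_antisymm h1 h2]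

-- explicit descending digit-value list [n, n-1, …, 0]
def pvDlist : Nat → List Int
  | 0 => [0]
  | n + 1 => ((n : Int) + 1) :: pvDlist n

theorem pv_scan_eq_max (n : Nat) (hn : n ≤ 9) (l : List Char)
    (hub : ∀ x ∈ l.filterMap
        (fun c => if PySem.Chars.isdigit c then PySem.Int.ofChars? [c] else none),
        x ≤ (n : Int)) :
    pvScan (pvDlist n) l
      = PySem.List.max?
          (l.filterMap
            (fun c => if PySem.Chars.isdigit c then PySem.Int.ofChars? [c] else none))
          (fun x => x) := by
  induction n with
  | zero =>
      simp only [pvDlist, pvScan]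
      rw [show (PySem.Int.toStr (0 : Int)).toList = [Char.ofNat (48 + 0)] from by decide]
      by_cases hin : Char.ofNat (48 + 0) ∈ l
      · rw [if_pos ((pv_isIn_singleton _ l).mpr hin)]
        exact (pv_max_eq _ 0 ((pv_mem_nums l 0 (by omega)).mpr hin) hub).symm
      · rw [if_neg (by simp [pv_isIn_singleton, hin])]
        have hempty : l.filterMap
            (fun c => if PySem.Chars.isdigit c then PySem.Int.ofChars? [c] else none) = [] := by
          by_contra hne
          obtain ⟨x, hx⟩ := List.exists_mem_of_ne_nil _ hne
          have h0 := (pv_nums_bounds l x hx).1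
          have h1 := hub x hx
          have hx0 : x = (0 : Int) := by omega
          rw [hx0] at hx
          exact hin ((pv_mem_nums l 0 (by omega)).mp hx)
        rw [hempty]
        rfl
  | succ m ih =>
      simp only [pvDlist, pvScan]
      have hcast : ((m : Int) + 1) = ((m + 1 : Nat) : Int) := by push_cast; ring
      rw [hcast, pv_toStr_digit (m + 1) hn]
      by_cases hin : Char.ofNat (48 + (m + 1)) ∈ l
      · rw [if_pos ((pv_isIn_singleton _ l).mpr hin)]
        exact (pv_max_eq _ _ ((pv_mem_nums l (m + 1) hn).mpr hin) hub).symm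
      · rw [if_neg (by simp [pv_isIn_singleton, hin])]
        apply ih (by omega)
        intro x hx
        have h9 := pv_nums_bounds l x hx
        have h1 := hub x hx
        by_contra hgt
        have hx1 : x = ((m + 1 : Nat) : Int) := by push_cast; push_cast at h1; omega
        rw [hx1] at hx
        exact hin ((pv_mem_nums l (m + 1) hn).mp hx)

theorem pv_range_eq : PySem.List.pyRange 9 (-1) (-1) = pvDlist 9 := by decide

-- ===== VERDICT (by name: the statement is the Claim_ definition above) =====
theorem get_phase_num_spec : Claim_equal_get_phase_num := by
  intro phase _
  unfold Spec_get_phase_num get_phase_num get_phase_num_alt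
  rw [pv_range_eq,
    pv_scan_eq_max 9 (le_refl 9) phase.toList
      (fun x hx => (pv_nums_bounds phase.toList x hx).2)]
  cases hmx : PySem.List.max?
      (phase.toList.filterMap
        (fun c => if PySem.Chars.isdigit c then PySem.Int.ofChars? [c] else none))
      (fun x => x) with
  | none =>
      rw [PySem.List.max?_eq_none_iff] at hmx
      simp [hmx]
  | some m =>
      have hne : phase.toList.filterMap
          (fun c => if PySem.Chars.isdigit c then PySem.Int.ofChars? [c] else none) ≠ [] := by
        intro h
        rw [h] at hmx
        exact absurd hmx (by simp [PySem.List.max?])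
      simp only [hmx]
      rw [if_neg (by simpa [List.length_eq_zero_iff] using hne)]
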